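-- pv_equiv track=rewrite | github.com/svdeepak99/Sliding_Block-BFS-A_Star-Pattern_Database_Heuristic | Pattern_Database_3x3.py | int_to_state
-- ===== SOURCE A (Python) =====
-- def int_to_state(int_st, size):
--     flat, mat = [], []
--     if size == 3:
--         for i in range(9):
--             flat.append(int_st % 9)
--             int_st //= 9
--         mat = [flat[0:3], flat[3:6], flat[6:9]]
--     elif size == 4:
--         for i in range(16):
--             flat.append(int_st & 15)
--             int_st >>= 4
--         mat = [flat[0:4], flat[4:8], flat[8:12], flat[12:16]]
--     return mat
-- ===== SOURCE B (Python) =====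
-- def int_to_state(int_st, size):
--     if size == 3:
--         base = 9
--     elif size == 4:
--         base = 16
--     else:
--         return []
--     return [[(int_st // base ** (r * size + c)) % base for c in range(size)]
--             for r in range(size)]
-- ===== Notes on version B (the rewrite author's own statement) =====
-- stated objective: simpler
-- what changed: Replaces the sequential peel loop (running quotient into a flat list, then slicing into rows) by independent closed-form digit extraction per cell: mat[r][c] = (int_st // base**(r*size+c)) % base with base 9 or 16.
import Mathlib
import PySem

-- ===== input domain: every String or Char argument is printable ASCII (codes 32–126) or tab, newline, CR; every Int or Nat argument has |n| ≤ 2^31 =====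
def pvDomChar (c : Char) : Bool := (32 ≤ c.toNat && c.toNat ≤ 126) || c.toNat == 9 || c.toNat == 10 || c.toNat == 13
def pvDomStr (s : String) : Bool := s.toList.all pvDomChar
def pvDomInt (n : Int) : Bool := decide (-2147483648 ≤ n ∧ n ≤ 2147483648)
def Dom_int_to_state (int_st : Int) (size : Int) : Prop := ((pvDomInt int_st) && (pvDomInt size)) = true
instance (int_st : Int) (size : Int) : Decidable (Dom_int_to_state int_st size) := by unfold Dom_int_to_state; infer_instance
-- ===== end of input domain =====

-- B replaces A's sequential peel-and-slice (running quotient + flat list + slicing) by independent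
-- closed-form digit extraction per cell: mat[r][c] = (int_st // base**(r*size+c)) % base.

-- ===== PORT A =====
-- A: build flat by repeatedly taking the low base-9 digit (resp. low 4 bits) and shrinking int_st,
-- then slice flat into rows.  'int_st & 15' = PySem.Int.band, 'int_st >>= 4' = '>>> 4' (exact per PYSEM).
def int_to_state (int_st : Int) (size : Int) : List (List Int) :=
  if size = 3 then
    let p := (PySem.List.pyRange 0 9 1).foldl
      (fun (st : List Int × Int) _ => (st.1 ++ [PySem.Int.mod st.2 9], PySem.Int.floordiv st.2 9))
      ([], int_st)
    [PySem.List.slice p.1 (some 0) (some 3), PySem.List.slice p.1 (some 3) (some 6),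
     PySem.List.slice p.1 (some 6) (some 9)]
  else if size = 4 then
    let p := (PySem.List.pyRange 0 16 1).foldl
      (fun (st : List Int × Int) _ => (st.1 ++ [PySem.Int.band st.2 15], st.2 >>> (4 : Nat)))
      ([], int_st)
    [PySem.List.slice p.1 (some 0) (some 4), PySem.List.slice p.1 (some 4) (some 8),
     PySem.List.slice p.1 (some 8) (some 12), PySem.List.slice p.1 (some 12) (some 16)]
  else []

-- ===== PORT B =====
-- B: each cell computed independently; 'base ** (r*size+c)' has a nonnegative exponent, ported via .toNat.
def int_to_state_alt (int_st : Int) (size : Int) : List (List Int) :=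
  if size = 3 then
    (PySem.List.pyRange 0 3 1).map (fun r =>
      (PySem.List.pyRange 0 3 1).map (fun c =>
        PySem.Int.mod (PySem.Int.floordiv int_st ((9 : Int) ^ (r * 3 + c).toNat)) 9))
  else if size = 4 then
    (PySem.List.pyRange 0 4 1).map (fun r =>
      (PySem.List.pyRange 0 4 1).map (fun c =>
        PySem.Int.mod (PySem.Int.floordiv int_st ((16 : Int) ^ (r * 4 + c).toNat)) 16))
  else []

-- ===== PRECONDITION & SPEC =====
def Spec_int_to_state (int_st : Int) (size : Int) (out : List (List Int)) : Prop := out = int_to_state_alt int_st size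
instance (int_st : Int) (size : Int) (out : List (List Int)) : Decidable (Spec_int_to_state int_st size out) := by unfold Spec_int_to_state; infer_instance

-- ===== CLAIM (what is proved, stated in full; the proofs are below) =====
def Claim_equal_int_to_state : Prop := ∀ (int_st : Int) (size : Int), Dom_int_to_state int_st size → Spec_int_to_state int_st size (int_to_state int_st size)

-- ===== LEMMAS AND PROOFS =====

lemma band15_eq_mod16 (a : Int) : PySem.Int.band a 15 = PySem.Int.mod a 16 := by
  have h : ∀ n : Nat, n &&& 15 = n % 16 := fun n => by
    have := Nat.and_two_pow_sub_one_eq_mod n 4; norm_num at this; exact this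
  rw [PySem.Int.mod_eq_emod_of_pos (by norm_num)]
  unfold PySem.Int.band
  split_ifs with h1 h2
  · rw [show ((15:Int).toNat) = 15 from rfl, h]; omega
  · omega
  · rw [show ((15:Int).toNat) = 15 from rfl, Nat.land_comm, h]; omega
  · omega

lemma shr4_eq_fdiv16 (a : Int) : a >>> (4 : Nat) = PySem.Int.floordiv a 16 := by
  simp [PySem.Int.floordiv, Int.shiftRight_eq_div_pow, Int.fdiv_eq_ediv]

lemma size3_eq (x : Int) : int_to_state x 3 = int_to_state_alt x 3 := by
  simp [int_to_state, int_to_state_alt,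
    show PySem.List.pyRange 0 9 1 = [0,1,2,3,4,5,6,7,8] from by decide,
    show PySem.List.pyRange 0 3 1 = [0,1,2] from by decide,
    PySem.List.slice, PySem.Int.floordiv_eq_ediv_of_pos, PySem.Int.mod_eq_emod_of_pos]
  omega

lemma size4_eq (x : Int) : int_to_state x 4 = int_to_state_alt x 4 := by
  simp [int_to_state, int_to_state_alt, band15_eq_mod16, shr4_eq_fdiv16,
    show PySem.List.pyRange 0 16 1 = [0,1,2,3,4,5,6,7,8,9,10,11,12,13,14,15] from by decide,
    show PySem.List.pyRange 0 4 1 = [0,1,2,3] from by decide,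
    PySem.List.slice, PySem.Int.floordiv_eq_ediv_of_pos, PySem.Int.mod_eq_emod_of_pos]
  omega

-- ===== VERDICT (by name: the statement is the Claim_ definition above) =====
theorem int_to_state_spec : Claim_equal_int_to_state := by
  intro int_st size _
  unfold Spec_int_to_state
  by_cases h3 : size = 3
  · subst h3; exact size3_eq int_st
  · by_cases h4 : size = 4
    · subst h4; exact size4_eq int_st
    · simp [int_to_state, int_to_state_alt, h3, h4]
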